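-- pv_equiv track=rewrite | github.com/pypi-data/pypi-mirror-297 | packages/areal-common-services/areal_common_services-1.0.1.tar.gz/areal_common_services-1.0.1/src/common_services/services/visual_line.py | vertical_line_store_wrt_x_axis
-- ===== SOURCE A (Python) =====
-- def merge_intervals(intervals):
--     if not intervals:
--         return []
--
--     # Sort the intervals based on the start time
--     sorted_intervals = sorted(intervals, key=lambda x: x[0])
--
--     merged_intervals = [sorted_intervals[0]]
--
--     for current_interval in sorted_intervals[1:]:
--         last_merged_interval = merged_intervals[-1]
--
--         # Check for overlap
--         if current_interval[0] <= last_merged_interval[1]: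
--             # Merge the overlapping intervals
--             last_merged_interval = (
--                 last_merged_interval[0],
--                 max(last_merged_interval[1], current_interval[1]),
--             )
--             merged_intervals[-1] = last_merged_interval
--         else:
--             # No overlap, add the current interval to the merged list
--             merged_intervals.append(current_interval)
--
--     return merged_intervals
--
-- def define_ranges(coordinates, threshold):
--     range_list = []
--     for coordinate in set(coordinates):
--         range_list.append((coordinate - threshold, coordinate + threshold))
--
--     merged_ranges = merge_intervals(range_list)
--
--     my_dict = dict()
--     for ranges in merged_ranges:
--         my_dict[ranges] = []
--
--     return my_dict
--
-- def vertical_line_store_wrt_x_axis(vertical_lines, threshold=5):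
--     my_dict = define_ranges([x[0][0] for x in vertical_lines], threshold)
--
--     for line in vertical_lines:
--         xmin, ymin, xmax, ymax = line[0]
--
--         for key in my_dict:
--             left_range, right_range = key
--
--             if left_range <= xmin <= right_range:
--                 my_dict[key].append(line)
--
--     return my_dict
-- ===== SOURCE B (Python) =====
-- def vertical_line_store_wrt_x_axis(vertical_lines, threshold=5):
--     # Sort the distinct xmin coordinates and merge their [x-t, x+t] ranges in one pass.
--     xs = sorted(set(x[0][0] for x in vertical_lines))
--     ranges = []
--     for x in xs:
--         if ranges and x - threshold <= ranges[-1][1]: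
--             ranges[-1] = (ranges[-1][0], max(ranges[-1][1], x + threshold))
--         else:
--             ranges.append((x - threshold, x + threshold))
--     starts = [r[0] for r in ranges]
--     buckets = [[] for _ in ranges]
--     for line in vertical_lines:
--         xmin = line[0][0]
--         # binary search: rightmost merged range whose start is <= xmin
--         lo, hi = 0, len(starts)
--         while lo < hi:
--             mid = (lo + hi) // 2
--             if starts[mid] <= xmin:
--                 lo = mid + 1
--             else:
--                 hi = mid
--         i = lo - 1
--         if i >= 0 and xmin <= ranges[i][1]:
--             buckets[i].append(line)
--     return {r: b for r, b in zip(ranges, buckets)}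
-- ===== Notes on version B (the rewrite author's own statement) =====
-- stated objective: faster
-- what changed: B sorts the distinct xmin values directly and merges their ranges in one pass, then assigns each line to its merged range by binary search over the sorted range starts instead of A's inner scan over every dict key per line.
import Mathlib
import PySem

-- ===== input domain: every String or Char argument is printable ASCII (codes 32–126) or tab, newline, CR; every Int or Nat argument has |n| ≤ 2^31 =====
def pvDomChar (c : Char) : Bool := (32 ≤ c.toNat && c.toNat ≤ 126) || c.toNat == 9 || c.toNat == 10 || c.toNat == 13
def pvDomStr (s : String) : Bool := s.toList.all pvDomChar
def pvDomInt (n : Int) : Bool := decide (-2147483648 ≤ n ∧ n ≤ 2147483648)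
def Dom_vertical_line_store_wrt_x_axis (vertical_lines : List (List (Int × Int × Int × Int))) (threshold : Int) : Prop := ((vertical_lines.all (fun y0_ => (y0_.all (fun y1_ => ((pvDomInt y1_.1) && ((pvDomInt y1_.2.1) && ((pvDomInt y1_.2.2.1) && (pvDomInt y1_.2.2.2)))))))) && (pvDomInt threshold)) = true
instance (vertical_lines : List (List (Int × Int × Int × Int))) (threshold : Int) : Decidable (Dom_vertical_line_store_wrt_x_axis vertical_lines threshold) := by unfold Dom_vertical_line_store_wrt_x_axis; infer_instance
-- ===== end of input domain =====

-- ===== PORT A =====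
-- B is faster: binary search per line over merged range starts, instead of A's scan of every dict key per line.
-- Equivalence is about the RETURN value; Pre_ excludes inputs containing an empty inner list (A raises IndexError there).
-- xmin of a line: line[0][0]; the pyGetD default is only reached outside Pre_.
def pvXmin (line : List (Int × Int × Int × Int)) : Int :=
  (PySem.List.pyGetD line 0 (0, 0, 0, 0)).1

def pvMergeStep (acc : List (Int × Int)) (cur : Int × Int) : List (Int × Int) :=
  match acc with
  | [] => [cur]
  | last :: acc' =>
    if cur.1 ≤ last.2 then (last.1, max last.2 cur.2) :: acc' else cur :: last :: acc'

-- merge_intervals from A: sort by start, keep merged list (reversed accumulator, last interval at head)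
def pvMergeIntervals (intervals : List (Int × Int)) : List (Int × Int) :=
  match PySem.List.sorted intervals (fun x => x.1) false with
  | [] => []
  | first :: rest => (rest.foldl pvMergeStep [first]).reverse

-- define_ranges from A
def pvDefineRanges (coordinates : List Int) (threshold : Int) :
    PySem.Dict (Int × Int) (List (List (Int × Int × Int × Int))) :=
  let range_list := (PySem.Set.ofList coordinates).map (fun c => (c - threshold, c + threshold))
  let merged := pvMergeIntervals range_list
  merged.foldl (fun d r => d.insert r []) PySem.Dict.empty

def vertical_line_store_wrt_x_axis (vertical_lines : List (List (Int × Int × Int × Int))) (threshold : Int) : List (Int × Int × List (List (Int × Int × Int × Int))) :=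
  let d0 := pvDefineRanges (vertical_lines.map pvXmin) threshold
  let d := vertical_lines.foldl (fun d line =>
      let xmin := pvXmin line
      d.keys.foldl (fun d' key =>
        if key.1 ≤ xmin ∧ xmin ≤ key.2 then d'.modify key [] (fun v => v ++ [line]) else d') d) d0
  d.items.map (fun kv => (kv.1.1, kv.1.2, kv.2))

-- ===== PORT B =====
-- hand-rolled binary search from Source B: rightmost index bound, lo/hi while loop (exact port)
def pvBisLoop (starts : List Int) (x : Int) (lo hi : Nat) : Nat :=
  if lo < hi then
    let mid := (lo + hi) / 2
    if starts.getD mid 0 ≤ x then pvBisLoop starts x (mid + 1) hi else pvBisLoop starts x lo mid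
  else lo
termination_by hi - lo

-- one merge pass over the sorted distinct xmins (reversed accumulator, last range at head)
def pvMergeXStep (threshold : Int) (acc : List (Int × Int)) (x : Int) : List (Int × Int) :=
  match acc with
  | [] => [(x - threshold, x + threshold)]
  | last :: acc' =>
    if x - threshold ≤ last.2 then (last.1, max last.2 (x + threshold)) :: acc'
    else (x - threshold, x + threshold) :: last :: acc'

def vertical_line_store_wrt_x_axis_alt (vertical_lines : List (List (Int × Int × Int × Int))) (threshold : Int) : List (Int × Int × List (List (Int × Int × Int × Int))) :=
  let xs := PySem.List.sorted (PySem.Set.ofList (vertical_lines.map pvXmin)) (fun x => x) false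
  let ranges := (xs.foldl (pvMergeXStep threshold) []).reverse
  let starts := ranges.map (fun r => r.1)
  let buckets := vertical_lines.foldl (fun bs line =>
      let xmin := pvXmin line
      let lo := pvBisLoop starts xmin 0 starts.length
      if 1 ≤ lo ∧ xmin ≤ (ranges.getD (lo - 1) (0, 0)).2 then
        bs.set (lo - 1) (bs.getD (lo - 1) [] ++ [line])
      else bs)
    (ranges.map (fun _ => ([] : List (List (Int × Int × Int × Int)))))
  (ranges.zip buckets).map (fun rb => (rb.1.1, rb.1.2, rb.2))

-- ===== PRECONDITION & SPEC =====
-- Pre_ excludes inputs with an empty inner list: A raises IndexError on line[0] there.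
def Pre_vertical_line_store_wrt_x_axis (vertical_lines : List (List (Int × Int × Int × Int))) (threshold : Int) : Prop :=
  ∀ l ∈ vertical_lines, l ≠ []
instance (vertical_lines : List (List (Int × Int × Int × Int))) (threshold : Int) : Decidable (Pre_vertical_line_store_wrt_x_axis vertical_lines threshold) := by unfold Pre_vertical_line_store_wrt_x_axis; infer_instance

def pvWitness_vertical_line_store_wrt_x_axis : (List (List (Int × Int × Int × Int))) × Int :=
  ([[(1, 2, 1, 9)], [(4, 0, 4, 7)], [(30, 1, 30, 5)]], 5)

def Spec_vertical_line_store_wrt_x_axis (vertical_lines : List (List (Int × Int × Int × Int))) (threshold : Int) (out : List (Int × Int × List (List (Int × Int × Int × Int)))) : Prop := out = vertical_line_store_wrt_x_axis_alt vertical_lines threshold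
instance (vertical_lines : List (List (Int × Int × Int × Int))) (threshold : Int) (out : List (Int × Int × List (List (Int × Int × Int × Int)))) : Decidable (Spec_vertical_line_store_wrt_x_axis vertical_lines threshold out) := by
  unfold Spec_vertical_line_store_wrt_x_axis
  have h0 : DecidableEq (List (List (Int × Int × Int × Int))) := inferInstance
  have h1 : DecidableEq (Int × List (List (Int × Int × Int × Int))) := @instDecidableEqProd _ _ _ h0
  have h2 : DecidableEq (Int × Int × List (List (Int × Int × Int × Int))) := @instDecidableEqProd _ _ _ h1
  exact @List.hasDecEq _ h2 _ _

-- ===== CLAIM (what is proved, stated in full; the proofs are below) =====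
def Claim_equal_vertical_line_store_wrt_x_axis : Prop := ∀ (vertical_lines : List (List (Int × Int × Int × Int))) (threshold : Int), Dom_vertical_line_store_wrt_x_axis vertical_lines threshold → Pre_vertical_line_store_wrt_x_axis vertical_lines threshold → Spec_vertical_line_store_wrt_x_axis vertical_lines threshold (vertical_line_store_wrt_x_axis vertical_lines threshold)


-- ===== LEMMAS AND PROOFS =====

-- consecutive merged ranges: disjoint and strictly increasing starts
def pvRel (a b : Int × Int) : Prop := a.2 < b.1 ∧ a.1 < b.1

-- the merged ranges both ports compute
def pvRanges (coords : List Int) (t : Int) : List (Int × Int) :=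
  ((PySem.List.sorted (PySem.Set.ofList coords) (fun x => x) false).foldl (pvMergeXStep t) []).reverse

theorem pvMergeStep_eq (t : Int) (acc : List (Int × Int)) (x : Int) :
    pvMergeStep acc (x - t, x + t) = pvMergeXStep t acc x := by
  cases acc <;> rfl

theorem pvFold_map_eq (t : Int) (l : List Int) (acc : List (Int × Int)) :
    (l.map (fun c => (c - t, c + t))).foldl pvMergeStep acc = l.foldl (pvMergeXStep t) acc := by
  induction l generalizing acc with
  | nil => rfl
  | cons x l ih => simp [List.foldl_cons, pvMergeStep_eq, ih]

theorem pvSorted_map (coords : List Int) (t : Int) :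
    PySem.List.sorted ((PySem.Set.ofList coords).map (fun c => (c - t, c + t))) (fun x => x.1) false
      = (PySem.List.sorted (PySem.Set.ofList coords) (fun x => x) false).map (fun c => (c - t, c + t)) := by
  apply PySem.List.sorted_eq_of_perm_of_pairwise_lt
  · exact (PySem.List.sorted_perm _ _ _).map _
  · exact List.Pairwise.map _ (fun a b h => by simpa using by omega)
      (PySem.List.sorted_ofList_pairwise_lt coords)

theorem pvMergeIntervals_eq (coords : List Int) (t : Int) :
    pvMergeIntervals ((PySem.Set.ofList coords).map (fun c => (c - t, c + t))) = pvRanges coords t := by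
  unfold pvMergeIntervals pvRanges
  rw [pvSorted_map]
  cases h : PySem.List.sorted (PySem.Set.ofList coords) (fun x => x) false with
  | nil => simp
  | cons x l => simp only [List.map_cons, List.foldl_cons, pvFold_map_eq]; rfl

theorem pvMergeFold_inv (t : Int) (l : List Int) : ∀ acc : List (Int × Int),
    l.Pairwise (· < ·) →
    acc.Pairwise (fun a b => pvRel b a) →
    (∀ a ∈ acc, ∀ y ∈ l, a.1 < y - t ∧ a.2 < y + t) →
    (l.foldl (pvMergeXStep t) acc).Pairwise (fun a b => pvRel b a) := by
  induction l with
  | nil => intro acc _ h _; exact h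
  | cons x l ih =>
    intro acc hl hacc hfwd
    rw [List.pairwise_cons] at hl
    obtain ⟨hxl, hl⟩ := hl
    rw [List.foldl_cons]
    cases acc with
    | nil =>
      apply ih _ hl (by simp [pvMergeXStep])
      intro a ha y hy
      simp [pvMergeXStep] at ha
      subst ha
      have := hxl y hy
      exact ⟨show x - t < y - t by omega, show x + t < y + t by omega⟩
    | cons last acc' =>
      simp only [pvMergeXStep]
      rw [List.pairwise_cons] at hacc
      obtain ⟨hlast, hacc'⟩ := hacc
      split
      · -- merge into last
        apply ih _ hl
        · rw [List.pairwise_cons]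
          exact ⟨fun a ha => hlast a ha, hacc'⟩
        · intro c hc y hy
          rcases List.mem_cons.1 hc with h | h
          · have h1 := hfwd last (by simp) y (by simp [hy])
            have h2 := hxl y hy
            rw [h]
            exact ⟨h1.1, max_lt h1.2 (by omega)⟩
          · exact hfwd c (by simp [h]) y (by simp [hy])
      · -- new range
        rename_i hnew
        rw [not_le] at hnew
        apply ih _ hl
        · rw [List.pairwise_cons]
          refine ⟨?_, List.pairwise_cons.2 ⟨hlast, hacc'⟩⟩
          intro c hc
          rcases List.mem_cons.1 hc with h | h
          · rw [h]; exact ⟨hnew, (hfwd last (by simp) x (by simp)).1⟩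
          · have h1 := hlast c h
            have h2 := hfwd last (by simp) x (by simp)
            exact ⟨lt_trans h1.1 h2.1, lt_trans h1.2 h2.1⟩
        · intro c hc y hy
          rcases List.mem_cons.1 hc with h | h
          · rw [h]
            have hxy := hxl y hy
            exact ⟨show x - t < y - t by omega, show x + t < y + t by omega⟩
          · exact hfwd c h y (by simp [hy])

theorem pvRanges_pairwise (coords : List Int) (t : Int) :
    (pvRanges coords t).Pairwise pvRel := by
  unfold pvRanges
  rw [List.pairwise_reverse]
  exact pvMergeFold_inv t _ []
    (PySem.List.sorted_ofList_pairwise_lt coords) (by simp) (by simp)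

theorem pvRanges_nodup (coords : List Int) (t : Int) : (pvRanges coords t).Nodup :=
  (pvRanges_pairwise coords t).imp (fun hab he => by subst he; exact lt_irrefl _ hab.2)

-- ---------- binary search ----------

theorem pvBisLoop_char_aux (starts : List Int) (x : Int) (hs : starts.Pairwise (· < ·)) :
    ∀ (n lo hi : Nat), hi - lo ≤ n → lo ≤ hi → hi ≤ starts.length →
    (∀ j, j < lo → ∀ (h : j < starts.length), starts[j] ≤ x) →
    (∀ j, hi ≤ j → ∀ (h : j < starts.length), x < starts[j]) →
    lo ≤ pvBisLoop starts x lo hi ∧ pvBisLoop starts x lo hi ≤ hi ∧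
      (∀ j (h : j < starts.length), starts[j] ≤ x ↔ j < pvBisLoop starts x lo hi) := by
  have hmono : ∀ (i j : Nat) (hj : j < starts.length) (hij : i ≤ j), starts[i]'(by omega) ≤ starts[j] := by
    intro i j hj hij
    rcases Nat.eq_or_lt_of_le hij with h | h
    · subst h; rfl
    · exact le_of_lt ((List.pairwise_iff_getElem.mp hs) i j (by omega) hj h)
  intro n
  induction n with
  | zero =>
    intro lo hi hn hlohi hhi hbelow habove
    have : lo = hi := by omega
    subst this
    rw [pvBisLoop]
    simp only [lt_irrefl, if_false]
    refine ⟨le_refl _, le_refl _, fun j h => ?_⟩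
    constructor
    · intro hle
      by_contra hge
      exact absurd hle (not_le.2 (habove j (by omega) h))
    · intro hlt
      exact hbelow j hlt h
  | succ n ih =>
    intro lo hi hn hlohi hhi hbelow habove
    rw [pvBisLoop]
    by_cases hlt : lo < hi
    · simp only [hlt, if_true]
      have hmidlt : (lo + hi) / 2 < hi := by omega
      have hmidge : lo ≤ (lo + hi) / 2 := by omega
      have hmidlen : (lo + hi) / 2 < starts.length := by omega
      rw [List.getD_eq_getElem _ _ hmidlen]
      by_cases hcmp : starts[(lo + hi) / 2] ≤ x
      · simp only [hcmp, if_true]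
        have h1 := ih ((lo + hi) / 2 + 1) hi (by omega) (by omega) hhi
          (fun j hj h => le_trans (hmono j ((lo + hi) / 2) hmidlen (by omega)) hcmp)
          habove
        exact ⟨by omega, h1.2.1, h1.2.2⟩
      · simp only [hcmp, if_false]
        have h1 := ih lo ((lo + hi) / 2) (by omega) (by omega) (by omega)
          hbelow
          (fun j hj h => lt_of_lt_of_le (not_le.1 hcmp) (hmono ((lo + hi) / 2) j h hj))
        exact ⟨h1.1, by omega, h1.2.2⟩
    · simp only [hlt, if_false]
      refine ⟨le_refl _, hlohi, fun j h => ⟨fun hle => ?_, fun hlt2 => hbelow j hlt2 h⟩⟩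
      by_contra hge
      exact absurd hle (not_le.2 (habove j (by omega) h))

theorem pvBisLoop_top (R : List (Int × Int)) (hR : R.Pairwise pvRel) (x : Int) :
    pvBisLoop (R.map (fun r => r.1)) x 0 (R.map (fun r => r.1)).length ≤ R.length ∧
      (∀ j (h : j < R.length), (R[j].1 ≤ x ↔ j < pvBisLoop (R.map (fun r => r.1)) x 0 (R.map (fun r => r.1)).length)) := by
  have hs : (R.map (fun r => r.1)).Pairwise (· < ·) :=
    List.Pairwise.map _ (fun a b h => h.2) hR
  have hchar := pvBisLoop_char_aux (R.map (fun r => r.1)) x hs (R.map (fun r => r.1)).length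
    0 (R.map (fun r => r.1)).length (by omega) (by omega) (le_refl _)
    (fun j hj h => by omega)
    (fun j hj h => by omega)
  refine ⟨by simpa using hchar.2.1, fun j h => ?_⟩
  have := hchar.2.2 j (by simpa using h)
  simpa using this

-- the bisect candidate is the only range that can contain the line's xmin
theorem pvUnique (R : List (Int × Int)) (hR : R.Pairwise pvRel) (line : List (Int × Int × Int × Int)) :
    (if 1 ≤ pvBisLoop (R.map (fun r => r.1)) (pvXmin line) 0 (R.map (fun r => r.1)).length ∧
        pvXmin line ≤ (R.getD (pvBisLoop (R.map (fun r => r.1)) (pvXmin line) 0 (R.map (fun r => r.1)).length - 1) (0, 0)).2 then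
      (∀ j (h : j < R.length), ((R[j].1 ≤ pvXmin line ∧ pvXmin line ≤ R[j].2) ↔ j = pvBisLoop (R.map (fun r => r.1)) (pvXmin line) 0 (R.map (fun r => r.1)).length - 1))
    else (∀ j (h : j < R.length), ¬ (R[j].1 ≤ pvXmin line ∧ pvXmin line ≤ R[j].2))) := by
  obtain ⟨hlen, hiff⟩ := pvBisLoop_top R hR (pvXmin line)
  have hpw := List.pairwise_iff_getElem.mp hR
  split
  · rename_i hhit
    obtain ⟨h1, h2⟩ := hhit
    have hlo1 : pvBisLoop (R.map (fun r => r.1)) (pvXmin line) 0 (R.map (fun r => r.1)).length - 1 < R.length := by omega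
    rw [List.getD_eq_getElem _ _ hlo1] at h2
    intro j h
    constructor
    · intro hc
      by_contra hne
      rcases Nat.lt_or_ge j (pvBisLoop (R.map (fun r => r.1)) (pvXmin line) 0 (R.map (fun r => r.1)).length) with hlt | hge
      · have hj1 : j < pvBisLoop (R.map (fun r => r.1)) (pvXmin line) 0 (R.map (fun r => r.1)).length - 1 := by omega
        have hd := hpw j _ h hlo1 (by omega)
        have hs1 := (hiff _ hlo1).2 (by omega)
        exact absurd hc.2 (not_le.2 (lt_of_lt_of_le hd.1 hs1))
      · exact absurd hc.1 (by rw [hiff j h]; omega)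
    · intro he
      subst he
      exact ⟨(hiff _ h).2 (by omega), h2⟩
  · rename_i hmiss
    intro j h hc
    rcases Nat.lt_or_ge j (pvBisLoop (R.map (fun r => r.1)) (pvXmin line) 0 (R.map (fun r => r.1)).length) with hlt | hge
    · have h1 : 1 ≤ pvBisLoop (R.map (fun r => r.1)) (pvXmin line) 0 (R.map (fun r => r.1)).length := by omega
      have hlo1 : pvBisLoop (R.map (fun r => r.1)) (pvXmin line) 0 (R.map (fun r => r.1)).length - 1 < R.length := by omega
      have h2 : ¬ pvXmin line ≤ (R[pvBisLoop (R.map (fun r => r.1)) (pvXmin line) 0 (R.map (fun r => r.1)).length - 1]'hlo1).2 := by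
        intro hcon
        exact hmiss ⟨h1, by rw [List.getD_eq_getElem _ _ hlo1]; exact hcon⟩
      rcases Nat.eq_or_lt_of_le (by omega : j ≤ pvBisLoop (R.map (fun r => r.1)) (pvXmin line) 0 (R.map (fun r => r.1)).length - 1) with he | hlt2
      · subst he; exact h2 hc.2
      · have hd := hpw j _ h hlo1 hlt2
        have hs1 := (hiff _ hlo1).2 (by omega)
        exact absurd hc.2 (not_le.2 (lt_of_lt_of_le hd.1 hs1))
    · exact absurd hc.1 (by rw [hiff j h]; omega)

-- B's per-line update is a pointwise conditional append over R
theorem pvStepB (R : List (Int × Int)) (hR : R.Pairwise pvRel)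
    (line : List (Int × Int × Int × Int))
    (g : (Int × Int) → List (List (Int × Int × Int × Int))) :
    (if 1 ≤ pvBisLoop (R.map (fun r => r.1)) (pvXmin line) 0 (R.map (fun r => r.1)).length ∧
        pvXmin line ≤ (R.getD (pvBisLoop (R.map (fun r => r.1)) (pvXmin line) 0 (R.map (fun r => r.1)).length - 1) (0, 0)).2 then
      (R.map g).set (pvBisLoop (R.map (fun r => r.1)) (pvXmin line) 0 (R.map (fun r => r.1)).length - 1)
        ((R.map g).getD (pvBisLoop (R.map (fun r => r.1)) (pvXmin line) 0 (R.map (fun r => r.1)).length - 1) [] ++ [line])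
     else (R.map g))
      = R.map (fun r => g r ++ if r.1 ≤ pvXmin line ∧ pvXmin line ≤ r.2 then [line] else []) := by
  have huniq := pvUnique R hR line
  obtain ⟨hlen, _⟩ := pvBisLoop_top R hR (pvXmin line)
  split at huniq
  · rename_i hhit
    rw [if_pos hhit]
    have hlo1 : pvBisLoop (R.map (fun r => r.1)) (pvXmin line) 0 (R.map (fun r => r.1)).length - 1 < R.length := by
      obtain ⟨h1, _⟩ := hhit; omega
    apply List.ext_getElem
    · simp
    · intro j hj hj2
      have hjR : j < R.length := by simpa using hj2
      rw [List.getElem_set]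
      by_cases he : pvBisLoop (R.map (fun r => r.1)) (pvXmin line) 0 (R.map (fun r => r.1)).length - 1 = j
      · rw [if_pos he]
        subst he
        have hcondj := (huniq _ hjR).2 rfl
        rw [List.getElem_map, if_pos hcondj, List.getD_eq_getElem _ _ (by simpa using hlo1),
          List.getElem_map]
      · rw [if_neg he]
        have hcondj := fun hc => he ((huniq j hjR).1 hc).symm
        rw [List.getElem_map, List.getElem_map, if_neg hcondj, List.append_nil]
  · rename_i hmiss
    rw [if_neg hmiss]
    symm
    apply List.map_congr_left
    intro r hr
    obtain ⟨j, hjR, hjr⟩ := List.mem_iff_getElem.mp hr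
    rw [← hjr]
    rw [if_neg (huniq j hjR), List.append_nil]

theorem pvZipMap (R : List (Int × Int)) (f : (Int × Int) → List (List (Int × Int × Int × Int))) :
    (R.zip (R.map f)).map (fun rb => (rb.1.1, rb.1.2, rb.2))
      = R.map (fun r => (r.1, r.2, f r)) := by
  induction R with
  | nil => rfl
  | cons r R ih => simp [List.zip_cons_cons, ih]

-- ---------- dict bookkeeping for A ----------

theorem pvKeys_insert_of_contains {κ ν : Type} [BEq κ] [LawfulBEq κ]
    (d : PySem.Dict κ ν) (k : κ) (v : ν) (h : d.contains k = true) :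
    (d.insert k v).keys = d.keys := by
  simp only [PySem.Dict.keys, PySem.Dict.items_insert_of_contains d v h, List.map_map]
  apply List.map_congr_left
  intro p _
  by_cases h2 : (p.1 == k) = true
  · simp only [Function.comp_def, h2, if_true]
    exact (eq_of_beq h2).symm
  · simp only [Function.comp_def, h2]
    simp

theorem pvDict_items_eq (d : PySem.Dict (Int × Int) (List (List (Int × Int × Int × Int))))
    (hn : d.keys.Nodup) :
    d.items = d.keys.map (fun k => (k, d.getD k [])) := by
  simp only [PySem.Dict.keys, List.map_map]
  symm
  conv_rhs => rw [← List.map_id d.items]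
  apply List.map_congr_left
  intro p hp
  have := PySem.Dict.getD_of_mem_items d (k := p.1) (v := p.2) (by simpa using hp) hn []
  simp [Function.comp, this]

theorem pvD0_items_aux (R : List (Int × Int)) : ∀ d : PySem.Dict (Int × Int) (List (List (Int × Int × Int × Int))),
    R.Nodup → (∀ r ∈ R, r ∉ d.keys) →
    (R.foldl (fun d r => d.insert r ([] : List (List (Int × Int × Int × Int)))) d).items
      = d.items ++ R.map (fun r => (r, [])) := by
  induction R with
  | nil => intro d _ _; simp
  | cons r R ih =>
    intro d hnd hout
    obtain ⟨hr, hnd'⟩ := List.nodup_cons.1 hnd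
    rw [List.foldl_cons]
    have hnc : d.contains r = false := by
      rw [PySem.Dict.contains_eq_decide_mem_keys]
      simpa using hout r (by simp)
    rw [ih _ hnd' ?_, PySem.Dict.items_insert_of_not_contains d _ hnc]
    · simp
    · intro r' hr'
      rw [PySem.Dict.mem_keys_insert]
      push_neg
      exact ⟨fun he => hr (he ▸ hr'), hout r' (by simp [hr'])⟩

theorem pvD0_items (R : List (Int × Int)) (hR : R.Nodup) :
    (R.foldl (fun d r => d.insert r ([] : List (List (Int × Int × Int × Int)))) PySem.Dict.empty).items
      = R.map (fun r => (r, [])) := by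
  have := pvD0_items_aux R PySem.Dict.empty hR (by simp [PySem.Dict.keys_empty])
  simpa using this

-- A's inner key loop, value at each key
theorem pvInner_getD (line : List (Int × Int × Int × Int)) :
    ∀ (ks : List (Int × Int)) (d : PySem.Dict (Int × Int) (List (List (Int × Int × Int × Int))))
      (r : Int × Int), ks.Nodup →
    (ks.foldl (fun d' key =>
        if key.1 ≤ pvXmin line ∧ pvXmin line ≤ key.2 then d'.modify key [] (fun v => v ++ [line]) else d') d).getD r []
      = if r ∈ ks ∧ (r.1 ≤ pvXmin line ∧ pvXmin line ≤ r.2) then d.getD r [] ++ [line] else d.getD r [] := by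
  intro ks
  induction ks with
  | nil => intro d r _; simp
  | cons k ks ih =>
    intro d r hnd
    obtain ⟨hk, hnd'⟩ := List.nodup_cons.1 hnd
    rw [List.foldl_cons, ih _ r hnd']
    by_cases hck : (k.1 ≤ pvXmin line ∧ pvXmin line ≤ k.2)
    · rw [if_pos hck]
      simp only [PySem.Dict.getD_modify]
      by_cases hrk : r = k
      · subst hrk
        simp [hk, hck]
      · simp [hrk, List.mem_cons]
    · rw [if_neg hck]
      by_cases hrk : r = k
      · subst hrk; simp [hck]
      · simp [List.mem_cons, hrk]

-- A's inner key loop keeps the key list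
theorem pvInner_keys (line : List (Int × Int × Int × Int)) :
    ∀ (ks : List (Int × Int)) (d : PySem.Dict (Int × Int) (List (List (Int × Int × Int × Int)))),
    (∀ k ∈ ks, k ∈ d.keys) →
    (ks.foldl (fun d' key =>
        if key.1 ≤ pvXmin line ∧ pvXmin line ≤ key.2 then d'.modify key [] (fun v => v ++ [line]) else d') d).keys
      = d.keys := by
  intro ks
  induction ks with
  | nil => intro d _; simp
  | cons k ks ih =>
    intro d hsub
    rw [List.foldl_cons]
    by_cases hck : (k.1 ≤ pvXmin line ∧ pvXmin line ≤ k.2)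
    · rw [if_pos hck]
      have hkeys : (d.modify k [] (fun v => v ++ [line])).keys = d.keys := by
        rw [PySem.Dict.keys_modify, pvKeys_insert_of_contains]
        rw [PySem.Dict.contains_eq_decide_mem_keys]
        simpa using hsub k (by simp)
      rw [ih _ ?_, hkeys]
      intro k' hk'
      rw [hkeys]
      exact hsub k' (by simp [hk'])
    · rw [if_neg hck]
      exact ih _ (fun k' hk' => hsub k' (by simp [hk']))

-- ---------- the two outer loops ----------

theorem pvOuterA (R : List (Int × Int)) (hR : R.Nodup)
    (lines : List (List (Int × Int × Int × Int))) :
    ∀ (d : PySem.Dict (Int × Int) (List (List (Int × Int × Int × Int))))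
      (g : (Int × Int) → List (List (Int × Int × Int × Int))),
    d.items = R.map (fun r => (r, g r)) →
    (lines.foldl (fun d line =>
        let xmin := pvXmin line
        d.keys.foldl (fun d' key =>
          if key.1 ≤ xmin ∧ xmin ≤ key.2 then d'.modify key [] (fun v => v ++ [line]) else d') d) d).items
      = R.map (fun r => (r, g r ++ lines.filter (fun line => decide (r.1 ≤ pvXmin line ∧ pvXmin line ≤ r.2)))) := by
  induction lines with
  | nil => intro d g hd; simpa using hd
  | cons line lines ih =>
    intro d g hd
    have hkeys : d.keys = R := by
      simp only [PySem.Dict.keys, hd, List.map_map]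
      rw [show ((fun x : (Int × Int) × List (List (Int × Int × Int × Int)) => x.1) ∘ fun r => (r, g r)) = id from rfl,
        List.map_id]
    have hnd : d.keys.Nodup := by rw [hkeys]; exact hR
    have hd1 : ((d.keys.foldl (fun d' key =>
          if key.1 ≤ pvXmin line ∧ pvXmin line ≤ key.2 then d'.modify key [] (fun v => v ++ [line]) else d') d)).items
        = R.map (fun r => (r, if r.1 ≤ pvXmin line ∧ pvXmin line ≤ r.2 then g r ++ [line] else g r)) := by
      have hk1 : ((d.keys.foldl (fun d' key =>
            if key.1 ≤ pvXmin line ∧ pvXmin line ≤ key.2 then d'.modify key [] (fun v => v ++ [line]) else d') d)).keys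
          = R := by
        rw [pvInner_keys line d.keys d (fun k hk => hk), hkeys]
      rw [pvDict_items_eq _ (by rw [hk1]; exact hR), hk1]
      apply List.map_congr_left
      intro r hrR
      have hget : d.getD r [] = g r :=
        PySem.Dict.getD_of_mem_items d (by rw [hd]; exact List.mem_map_of_mem hrR) hnd []
      rw [pvInner_getD line d.keys d r hnd, hkeys, hget]
      by_cases hc : (r.1 ≤ pvXmin line ∧ pvXmin line ≤ r.2)
      · rw [if_pos ⟨hrR, hc⟩, if_pos hc]
      · rw [if_neg (fun h => hc h.2), if_neg hc]
    rw [List.foldl_cons]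
    have hmc : R.map (fun r => (r, g r ++ (line :: lines).filter (fun line => decide (r.1 ≤ pvXmin line ∧ pvXmin line ≤ r.2))))
        = R.map (fun r => (r, (if r.1 ≤ pvXmin line ∧ pvXmin line ≤ r.2 then g r ++ [line] else g r)
            ++ lines.filter (fun line => decide (r.1 ≤ pvXmin line ∧ pvXmin line ≤ r.2)))) := by
      apply List.map_congr_left
      intro r _
      by_cases hc : (r.1 ≤ pvXmin line ∧ pvXmin line ≤ r.2) <;>
        simp [List.filter_cons, hc, List.append_assoc]
    rw [hmc]
    exact ih _ _ hd1

theorem pvOuterB (R : List (Int × Int)) (hR : R.Pairwise pvRel)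
    (lines : List (List (Int × Int × Int × Int))) :
    ∀ g : (Int × Int) → List (List (Int × Int × Int × Int)),
    (lines.foldl (fun bs line =>
        let xmin := pvXmin line
        let lo := pvBisLoop (R.map (fun r => r.1)) xmin 0 (R.map (fun r => r.1)).length
        if 1 ≤ lo ∧ xmin ≤ (R.getD (lo - 1) (0, 0)).2 then
          bs.set (lo - 1) (bs.getD (lo - 1) [] ++ [line])
        else bs) (R.map g))
      = R.map (fun r => g r ++ lines.filter (fun line => decide (r.1 ≤ pvXmin line ∧ pvXmin line ≤ r.2))) := by
  induction lines with
  | nil =>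
    intro g
    simp only [List.foldl_nil, List.filter_nil, List.append_nil]
  | cons line lines ih =>
    intro g
    rw [List.foldl_cons]
    have hmc : R.map (fun r => g r ++ (line :: lines).filter (fun line => decide (r.1 ≤ pvXmin line ∧ pvXmin line ≤ r.2)))
        = R.map (fun r => (g r ++ if r.1 ≤ pvXmin line ∧ pvXmin line ≤ r.2 then [line] else [])
            ++ lines.filter (fun line => decide (r.1 ≤ pvXmin line ∧ pvXmin line ≤ r.2))) := by
      apply List.map_congr_left
      intro r _
      by_cases hc : (r.1 ≤ pvXmin line ∧ pvXmin line ≤ r.2) <;>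
        simp [List.filter_cons, hc, List.append_assoc]
    rw [hmc, ← ih (fun r => g r ++ if r.1 ≤ pvXmin line ∧ pvXmin line ≤ r.2 then [line] else [])]
    congr 1
    exact pvStepB R hR line g

-- ---------- assembly ----------

theorem pvA_items (lines : List (List (Int × Int × Int × Int))) (t : Int) :
    (pvDefineRanges (lines.map pvXmin) t).items
      = (pvRanges (lines.map pvXmin) t).map (fun r => (r, [])) := by
  simp only [pvDefineRanges]
  rw [pvMergeIntervals_eq]
  exact pvD0_items _ (pvRanges_nodup _ _)

theorem pvA_eq (vertical_lines : List (List (Int × Int × Int × Int))) (threshold : Int) :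
    vertical_line_store_wrt_x_axis vertical_lines threshold
      = (pvRanges (vertical_lines.map pvXmin) threshold).map
          (fun r => (r.1, r.2, vertical_lines.filter (fun line => decide (r.1 ≤ pvXmin line ∧ pvXmin line ≤ r.2)))) := by
  simp only [vertical_line_store_wrt_x_axis]
  rw [pvOuterA (pvRanges (vertical_lines.map pvXmin) threshold) (pvRanges_nodup _ _) vertical_lines
    (pvDefineRanges (vertical_lines.map pvXmin) threshold) (fun _ => [])
    (by rw [pvA_items])]
  simp [List.map_map, Function.comp]

theorem pvB_eq (vertical_lines : List (List (Int × Int × Int × Int))) (threshold : Int) :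
    vertical_line_store_wrt_x_axis_alt vertical_lines threshold
      = (pvRanges (vertical_lines.map pvXmin) threshold).map
          (fun r => (r.1, r.2, vertical_lines.filter (fun line => decide (r.1 ≤ pvXmin line ∧ pvXmin line ≤ r.2)))) := by
  simp only [vertical_line_store_wrt_x_axis_alt]
  have hrev : ((PySem.List.sorted (PySem.Set.ofList (vertical_lines.map pvXmin)) (fun x => x) false).foldl
      (pvMergeXStep threshold) []).reverse = pvRanges (vertical_lines.map pvXmin) threshold := rfl
  rw [hrev]
  rw [pvOuterB (pvRanges (vertical_lines.map pvXmin) threshold) (pvRanges_pairwise _ _) vertical_lines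
    (fun _ => ([] : List (List (Int × Int × Int × Int))))]
  rw [pvZipMap]
  simp



-- ===== VERDICT (by name: the statement is the Claim_ definition above) =====
theorem vertical_line_store_wrt_x_axis_spec : Claim_equal_vertical_line_store_wrt_x_axis := by
  intro vertical_lines threshold _ _
  unfold Spec_vertical_line_store_wrt_x_axis
  rw [pvA_eq, pvB_eq]
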